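-- pv_equiv track=rewrite | github.com/Isaiah1810/CMU-112-Term-Project-iew | TextAdventure.py | createLookupDict
-- ===== SOURCE A (Python) =====
-- def createLookupDict(words):
--     lookupDict = dict()
--     for i in range(len(words)):
--          lookupDict[words[i]] = dict()
--     for j in range(len(words)-1):
--         if words[j+1] not in lookupDict[words[j]]:
--             lookupDict[words[j]][words[j+1]] = 1
--         else:
--             lookupDict[words[j]][words[j+1]] += 1
--     return lookupDict
-- ===== SOURCE B (Python) =====
-- def createLookupDict(words):
--     # Two phases: bucket all successors by their left word in one pass,
--     # then tally each first-seen word's bucket into its own dict.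
--     succs = {}
--     for a, b in zip(words, words[1:]):
--         succs.setdefault(a, []).append(b)
--     result = {}
--     for w in words:
--         if w not in result:
--             counts = {}
--             for b in succs.get(w, []):
--                 counts[b] = counts.get(b, 0) + 1
--             result[w] = counts
--     return result
-- ===== Notes on version B (the rewrite author's own statement) =====
-- stated objective: alternative
-- what changed: Instead of one pass that seeds nested dicts and increments lookupDict[words[j]][words[j+1]] in place, B first groups all successors into per-word bucket lists in a flat pass over the bigrams, then builds each first-seen word's successor-count dict once by tallying its bucket.
import Mathlib
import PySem

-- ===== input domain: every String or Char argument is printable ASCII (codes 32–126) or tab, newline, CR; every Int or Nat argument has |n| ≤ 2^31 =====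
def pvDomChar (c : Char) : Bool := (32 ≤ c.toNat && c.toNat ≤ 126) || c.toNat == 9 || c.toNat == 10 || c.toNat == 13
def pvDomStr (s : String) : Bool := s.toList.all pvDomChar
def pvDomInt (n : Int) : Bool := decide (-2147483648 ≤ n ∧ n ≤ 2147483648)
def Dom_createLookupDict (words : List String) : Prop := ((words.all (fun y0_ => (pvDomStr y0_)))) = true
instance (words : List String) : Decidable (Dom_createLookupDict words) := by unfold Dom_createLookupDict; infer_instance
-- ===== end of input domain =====

-- B replaces A's single in-place pass over nested dicts by two phases: bucket successors per
-- left word in one flat pass, then tally each first-seen word's bucket (objective: alternative).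

-- ===== PORT A =====
def createLookupDict (words : List String) : List (String × List (String × Int)) :=
  -- for i in range(len(words)): lookupDict[words[i]] = dict()
  let lookupDict : PySem.Dict String (PySem.Dict String Int) :=
    List.foldl (fun d i => d.insert (PySem.List.pyGetD words i "") PySem.Dict.empty)
      PySem.Dict.empty (PySem.List.pyRange 0 (PySem.List.len words))
  -- for j in range(len(words)-1): if words[j+1] not in lookupDict[words[j]]: … = 1 else: … += 1
  let lookupDict : PySem.Dict String (PySem.Dict String Int) :=
    List.foldl (fun d j =>
      let wj := PySem.List.pyGetD words j ""
      let wj1 := PySem.List.pyGetD words (j + 1) ""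
      if (d.getD wj PySem.Dict.empty).get? wj1 = none then
        d.insert wj ((d.getD wj PySem.Dict.empty).insert wj1 1)
      else
        d.insert wj ((d.getD wj PySem.Dict.empty).insert wj1
          ((d.getD wj PySem.Dict.empty).getD wj1 0 + 1)))
      lookupDict (PySem.List.pyRange 0 (PySem.List.len words - 1))
  lookupDict.items.map (fun p => (p.1, p.2.items))

-- ===== PORT B =====
def createLookupDict_alt (words : List String) : List (String × List (String × Int)) :=
  -- succs.setdefault(a, []).append(b)
  let succs : PySem.Dict String (List String) :=
    List.foldl (fun d p => d.insert p.1 (d.getD p.1 [] ++ [p.2]))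
      PySem.Dict.empty (words.zip words.tail)
  let result : PySem.Dict String (PySem.Dict String Int) :=
    List.foldl (fun r w =>
      if PySem.Dict.get? r w = none then
        r.insert w (List.foldl (fun counts b => counts.insert b (counts.getD b 0 + 1))
          PySem.Dict.empty (succs.getD w []))
      else r)
      PySem.Dict.empty words
  result.items.map (fun p => (p.1, p.2.items))

-- ===== PRECONDITION & SPEC =====
def Spec_createLookupDict (words : List String) (out : List (String × List (String × Int))) : Prop := out = createLookupDict_alt words
instance (words : List String) (out : List (String × List (String × Int))) : Decidable (Spec_createLookupDict words out) := by unfold Spec_createLookupDict; infer_instance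

-- ===== CLAIM (what is proved, stated in full; the proofs are below) =====
def Claim_equal_createLookupDict : Prop := ∀ (words : List String), Dom_createLookupDict words → Spec_createLookupDict words (createLookupDict words)

-- ===== LEMMAS AND PROOFS =====

-- ordered dedup as a left fold (proof-side normal form for the outer dict's keys)
def pvDStep (acc : List String) (w : String) : List String := if w ∈ acc then acc else acc ++ [w]

-- inner successor-count step (B's inner-loop body)
def pvIStep (w : String) (counts : PySem.Dict String Int) (p : String × String) : PySem.Dict String Int :=
  if p.1 == w then counts.insert p.2 (counts.getD p.2 0 + 1) else counts

theorem pv_get?_mkmap (g : String → PySem.Dict String Int) (acc : List String) (w : String) :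
    PySem.Dict.get? ⟨acc.map (fun v => (v, g v))⟩ w = if w ∈ acc then some (g w) else none := by
  induction acc with
  | nil => simp [PySem.Dict.get?]
  | cons a t ih =>
    simp only [PySem.Dict.get?, List.map_cons, List.find?] at *
    by_cases h : a = w
    · subst h; simp
    · have hb : (a == w) = false := by simp [h]
      simp only [hb, List.mem_cons]
      rw [ih]
      have hwa : ¬ (w = a) := fun hh => h hh.symm
      have : (w = a ∨ w ∈ t) ↔ w ∈ t := by simp [hwa]
      rw [if_congr this rfl rfl]

theorem pv_insert_mkmap (g : String → PySem.Dict String Int) (acc : List String) (w : String)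
    (v : PySem.Dict String Int) (hw : w ∈ acc) :
    PySem.Dict.insert ⟨acc.map (fun u => (u, g u))⟩ w v
      = ⟨acc.map (fun u => (u, if u = w then v else g u))⟩ := by
  have hc : PySem.Dict.contains ⟨acc.map (fun u => (u, g u))⟩ w = true := by
    simp only [PySem.Dict.contains, List.any_map, List.any_eq_true, Function.comp]
    exact ⟨w, hw, by simp⟩
  simp only [PySem.Dict.insert, hc, if_true, List.map_map]
  congr 1
  apply List.map_congr_left
  intro u _
  by_cases h : u = w
  · subst h; simp
  · simp [h, Function.comp]

theorem pv_insert_append (g : String → PySem.Dict String Int) (acc : List String) (w : String)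
    (v : PySem.Dict String Int) (hw : w ∉ acc) :
    PySem.Dict.insert ⟨acc.map (fun u => (u, g u))⟩ w v
      = ⟨acc.map (fun u => (u, g u)) ++ [(w, v)]⟩ := by
  have hc : PySem.Dict.contains ⟨acc.map (fun u => (u, g u))⟩ w = false := by
    simp only [PySem.Dict.contains, List.any_map, List.any_eq_false, Function.comp]
    intro x hx; simp only [beq_iff_eq]; exact fun h => (hw (h ▸ hx)).elim
  simp [PySem.Dict.insert, hc]

theorem pv_mem_foldl_dstep (l : List String) : ∀ (acc : List String) (x : String),
    x ∈ List.foldl pvDStep acc l ↔ x ∈ acc ∨ x ∈ l := by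
  induction l with
  | nil => simp
  | cons a t ih =>
    intro acc x
    simp only [List.foldl_cons, pvDStep]
    by_cases h : a ∈ acc
    · rw [if_pos h, ih]
      constructor
      · rintro (hx | hx) <;> simp [hx]
      · rintro (hx | hx); · simp [hx]
        rcases List.mem_cons.mp hx with rfl | hx
        · left; exact h
        · right; exact hx
    · rw [if_neg h, ih]
      simp only [List.mem_append, List.mem_cons]
      tauto

-- seed loop: repeated d[w] = {} builds the ordered-dedup map to empty dicts
theorem pv_seed (l : List String) : ∀ acc : List String,
    List.foldl (fun d w => PySem.Dict.insert d w PySem.Dict.empty)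
        ⟨acc.map (fun u => (u, (PySem.Dict.empty : PySem.Dict String Int)))⟩ l
      = ⟨(List.foldl pvDStep acc l).map (fun u => (u, (PySem.Dict.empty : PySem.Dict String Int)))⟩ := by
  induction l with
  | nil => intro acc; simp
  | cons a t ih =>
    intro acc
    simp only [List.foldl_cons, pvDStep]
    by_cases h : a ∈ acc
    · rw [if_pos h, pv_insert_mkmap _ acc a _ h]
      have : (fun u => (u, if u = a then (PySem.Dict.empty : PySem.Dict String Int) else PySem.Dict.empty))
           = (fun u => (u, (PySem.Dict.empty : PySem.Dict String Int))) := by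
        funext u; simp
      rw [this]; exact ih acc
    · rw [if_neg h, pv_insert_append _ acc a _ h]
      have : (acc.map (fun u => (u, (PySem.Dict.empty : PySem.Dict String Int))) ++ [(a, PySem.Dict.empty)])
           = (acc ++ [a]).map (fun u => (u, (PySem.Dict.empty : PySem.Dict String Int))) := by simp
      rw [this]; exact ih (acc ++ [a])

-- A's counting loop over any pair list, on a map-shaped dict, acts pointwise as pvIStep
theorem pv_countA (ps : List (String × String)) : ∀ (D : List String)
    (g : String → PySem.Dict String Int), (∀ p ∈ ps, p.1 ∈ D) →
    List.foldl (fun (d : PySem.Dict String (PySem.Dict String Int)) p =>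
        if (d.getD p.1 PySem.Dict.empty).get? p.2 = none then
          d.insert p.1 ((d.getD p.1 PySem.Dict.empty).insert p.2 1)
        else
          d.insert p.1 ((d.getD p.1 PySem.Dict.empty).insert p.2
            ((d.getD p.1 PySem.Dict.empty).getD p.2 0 + 1)))
      ⟨D.map (fun w => (w, g w))⟩ ps
    = ⟨D.map (fun w => (w, List.foldl (pvIStep w) (g w) ps))⟩ := by
  induction ps with
  | nil => intro D g _; simp
  | cons p t ih =>
    intro D g hmem
    have hp : p.1 ∈ D := hmem p (List.mem_cons_self)
    have hgd : PySem.Dict.getD ⟨D.map (fun w => (w, g w))⟩ p.1 PySem.Dict.empty = g p.1 := by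
      simp [PySem.Dict.getD, pv_get?_mkmap, hp]
    simp only [List.foldl_cons, hgd]
    have hstep : (if (g p.1).get? p.2 = none then
          PySem.Dict.insert ⟨D.map (fun w => (w, g w))⟩ p.1 ((g p.1).insert p.2 1)
        else
          PySem.Dict.insert ⟨D.map (fun w => (w, g w))⟩ p.1
            ((g p.1).insert p.2 ((g p.1).getD p.2 0 + 1)))
        = PySem.Dict.insert ⟨D.map (fun w => (w, g w))⟩ p.1
            ((g p.1).insert p.2 ((g p.1).getD p.2 0 + 1)) := by
      by_cases hn : (g p.1).get? p.2 = none
      · rw [if_pos hn]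
        have : (g p.1).getD p.2 0 = 0 := by simp [PySem.Dict.getD, hn]
        rw [this]; norm_num
      · rw [if_neg hn]
    rw [hstep, pv_insert_mkmap _ D p.1 _ hp]
    have hfun : (fun u => (u, if u = p.1 then (g p.1).insert p.2 ((g p.1).getD p.2 0 + 1) else g u))
        = (fun u => (u, pvIStep u (g u) p)) := by
      funext u
      by_cases h : u = p.1
      · subst h; simp [pvIStep]
      · have : (p.1 == u) = false := by simp; exact fun hh => h hh.symm
        simp [h, pvIStep, this]
    rw [hfun, ih D (fun u => pvIStep u (g u) p) (fun q hq => hmem q (List.mem_cons_of_mem _ hq))]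

theorem pv_zip_getElem? (l : List String) (m : Nat) (hm : m < l.length - 1) :
    (l.zip l.tail)[m]? = some (l.getD m "", l.getD (m+1) "") := by
  have h1 : m < l.length := by omega
  have ht : m < l.tail.length := by simp [List.length_tail]; omega
  have h2 : m + 1 < l.length := by omega
  have hz : m < (l.zip l.tail).length := by simp [List.length_zip]; omega
  rw [List.getElem?_eq_getElem hz]
  congr 1
  rw [List.getElem_zip]
  simp [List.getElem_tail, h1, h2]

theorem pv_zipfold_aux {D : Type} (F : D → String → String → D) (l : List String)
    (m : Nat) (hm : m ≤ l.length - 1) : ∀ d : D,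
    List.foldl (fun r k => F r (l.getD k "") (l.getD (k+1) "")) d (List.range m)
      = List.foldl (fun r p => F r p.1 p.2) d ((l.zip l.tail).take m) := by
  induction m with
  | zero => intro d; simp
  | succ m ih =>
    intro d
    rw [List.range_succ, List.foldl_append, ih (by omega), List.take_add_one,
      pv_zip_getElem? l m (by omega), List.foldl_append]
    simp

-- A's index loop over range(len-1) is the same fold over zip(words, words[1:])
theorem pv_zipfold {D : Type} (F : D → String → String → D) (l : List String) (d : D) :
    List.foldl (fun r j => F r (PySem.List.pyGetD l j "") (PySem.List.pyGetD l (j + 1) ""))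
        d (PySem.List.pyRange 0 (PySem.List.len l - 1))
      = List.foldl (fun r p => F r p.1 p.2) d (l.zip l.tail) := by
  cases l with
  | nil => simp [PySem.List.len, PySem.List.pyRange]
  | cons x xs =>
    have hlen : PySem.List.len (x :: xs) - 1 = ((xs.length : Int)) := by
      simp [PySem.List.len]
    rw [hlen, PySem.List.pyRange_zero_natCast, List.foldl_map]
    have : ∀ (r : D) (k : Nat),
        F r (PySem.List.pyGetD (x :: xs) (↑k) "") (PySem.List.pyGetD (x :: xs) ((↑k) + 1) "")
          = F r ((x :: xs).getD k "") ((x :: xs).getD (k+1) "") := by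
      intro r k
      have : ((k : Int) + 1) = ((k + 1 : Nat) : Int) := by push_cast; ring
      rw [this, PySem.List.pyGetD_natCast, PySem.List.pyGetD_natCast]
    rw [PySem.List.foldl_congr_mem _ _ _ _ (fun r k _ => this r k)]
    rw [pv_zipfold_aux F (x :: xs) xs.length (by simp)]
    have : ((x :: xs).zip (x :: xs).tail).take xs.length = (x :: xs).zip (x :: xs).tail := by
      apply List.take_of_length_le
      simp [List.length_zip]
    rw [this]

-- B's outer loop builds the ordered-dedup map to the per-word counts
theorem pv_bfold (C : String → PySem.Dict String Int) (l : List String) : ∀ acc : List String,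
    List.foldl (fun r w => if PySem.Dict.get? r w = none then r.insert w (C w) else r)
        ⟨acc.map (fun u => (u, C u))⟩ l
      = ⟨(List.foldl pvDStep acc l).map (fun u => (u, C u))⟩ := by
  induction l with
  | nil => intro acc; simp
  | cons a t ih =>
    intro acc
    simp only [List.foldl_cons, pvDStep, pv_get?_mkmap]
    by_cases h : a ∈ acc
    · simp only [h, if_pos, reduceCtorEq, if_false]
      exact ih acc
    · simp only [h, if_false]
      rw [pv_insert_append C acc a (C a) h]
      have : (acc.map (fun u => (u, C u)) ++ [(a, C a)]) = (acc ++ [a]).map (fun u => (u, C u)) := by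
        simp
      rw [this]
      exact ih (acc ++ [a])

-- phase 1: the bucket dict maps w to the successors of w, in order
theorem pv_getD_succs (ps : List (String × String)) : ∀ (d : PySem.Dict String (List String)) (w : String),
    (List.foldl (fun (d : PySem.Dict String (List String)) p =>
        d.insert p.1 (d.getD p.1 [] ++ [p.2])) d ps).getD w []
      = d.getD w [] ++ (ps.filter (fun p => p.1 == w)).map Prod.snd := by
  induction ps with
  | nil => intro d w; simp
  | cons p t ih =>
    intro d w
    simp only [List.foldl_cons, List.filter_cons]
    rw [ih]
    by_cases h : p.1 = w
    · simp [h]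
    · have hb : (p.1 == w) = false := by simp [h]
      have : ¬ (w = p.1) := fun hh => h hh.symm
      simp [PySem.Dict.getD_insert, hb, this]

-- counting with a first-component guard = counting the filtered successors
theorem pv_istep_filter (ps : List (String × String)) : ∀ (w : String) (c : PySem.Dict String Int),
    List.foldl (pvIStep w) c ps
      = List.foldl (fun counts b => counts.insert b (counts.getD b 0 + 1)) c
          ((ps.filter (fun p => p.1 == w)).map Prod.snd) := by
  induction ps with
  | nil => intro w c; simp
  | cons p t ih =>
    intro w c
    simp only [List.foldl_cons, List.filter_cons, pvIStep]
    by_cases h : (p.1 == w) = true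
    · simp only [h, if_true, List.map_cons, List.foldl_cons]
      exact ih w _

    · simp only [Bool.not_eq_true] at h
      simp only [h, Bool.false_eq_true, if_false]
      exact ih w c

-- ===== VERDICT (by name: the statement is the Claim_ definition above) =====
theorem createLookupDict_spec : Claim_equal_createLookupDict := by
  intro words _
  unfold Spec_createLookupDict createLookupDict createLookupDict_alt
  -- A's seed loop over range(len(words)) is a fold over words itself
  rw [PySem.List.foldl_pyRange_pyGetD words "" (fun d w => PySem.Dict.insert d w PySem.Dict.empty)
    PySem.Dict.empty (le_refl 0)]
  simp only [Int.toNat_zero, List.drop_zero]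
  have hseed := pv_seed words []
  simp only [List.map_nil] at hseed
  rw [show (PySem.Dict.empty : PySem.Dict String (PySem.Dict String Int)) = ⟨[]⟩ from rfl, hseed]
  -- A's counting loop becomes a fold over zip(words, words[1:])
  have hzip := pv_zipfold (fun d a b =>
      if (d.getD a PySem.Dict.empty).get? b = none then
        d.insert a ((d.getD a PySem.Dict.empty).insert b 1)
      else
        d.insert a ((d.getD a PySem.Dict.empty).insert b
          ((d.getD a PySem.Dict.empty).getD b 0 + 1))) words
    (⟨(List.foldl pvDStep [] words).map (fun u => (u, PySem.Dict.empty))⟩ :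
      PySem.Dict String (PySem.Dict String Int))
  beta_reduce at hzip
  rw [hzip]
  rw [pv_countA (words.zip words.tail) (List.foldl pvDStep [] words) (fun _ => PySem.Dict.empty)
    (fun p hp => (pv_mem_foldl_dstep words [] p.1).mpr (Or.inr (List.of_mem_zip hp).1))]
  -- B's side
  have hb := pv_bfold (fun w => List.foldl
      (fun (counts : PySem.Dict String Int) b => counts.insert b (counts.getD b 0 + 1))
      PySem.Dict.empty
      ((List.foldl (fun (d : PySem.Dict String (List String)) p =>
          d.insert p.1 (d.getD p.1 [] ++ [p.2])) PySem.Dict.empty (words.zip words.tail)).getD w []))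
    words []
  simp only [List.map_nil] at hb
  rw [hb]
  congr 1
  apply List.map_congr_left
  intro w _
  congr 1
  rw [pv_getD_succs (words.zip words.tail) PySem.Dict.empty w,
    pv_istep_filter (words.zip words.tail) w PySem.Dict.empty]
  have : (PySem.Dict.empty : PySem.Dict String (List String)).getD w [] = [] := by
    simp [PySem.Dict.getD, PySem.Dict.get?, PySem.Dict.empty]
  rw [this, List.nil_append]
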